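-- pv_equiv track=rewrite | github.com/WikimediaCAT/plantilles | persona/tipus.py | taula_comments
-- ===== SOURCE A (Python) =====
-- def taula_comments(text):
--     taula = []
--     encomentari = False
--     i = 0
--     while True:
--         if encomentari and text[i:i + 3] == "-->":
--             i = i + 3
--             encomentari = False
--             taula.append((inicoment, i))
--             if i < len(text):
--                 continue
--             else:
--                 break
--         if text[i:i + 4] == "<!--":
--             encomentari = True
--             inicoment = i
--             i = i + 4
--             if i < len(text):
--                 continue
--             else:
--                 break
--         i = i + 1
--         if i < len(text):
--             continue
--         else:
--             break
--     return taula
-- ===== SOURCE B (Python) =====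
-- def taula_comments(text):
--     taula = []
--     encomentari = False
--     inicoment = 0
--     i = 0
--     while True:
--         if encomentari:
--             close = text.find("-->", i)
--             reopen = text.find("<!--", i)
--             if reopen != -1 and (close == -1 or reopen < close):
--                 # a nested "<!--" before the close resets the start (A's rule)
--                 inicoment = reopen
--                 i = reopen + 4
--             elif close == -1:
--                 return taula
--             else:
--                 taula.append((inicoment, close + 3))
--                 i = close + 3
--                 encomentari = False
--         else:
--             j = text.find("<!--", i)
--             if j == -1:
--                 return taula
--             encomentari = True
--             inicoment = j
--             i = j + 4
-- ===== Notes on version B (the rewrite author's own statement) =====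
-- stated objective: faster
-- what changed: B replaces A's one-character-at-a-time while-loop state machine by a find/jump scanner that leaps directly between '<!--' and '-->' occurrences via str.find, keeping A's start-reset rule for a nested '<!--' inside an open comment.
import Mathlib
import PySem

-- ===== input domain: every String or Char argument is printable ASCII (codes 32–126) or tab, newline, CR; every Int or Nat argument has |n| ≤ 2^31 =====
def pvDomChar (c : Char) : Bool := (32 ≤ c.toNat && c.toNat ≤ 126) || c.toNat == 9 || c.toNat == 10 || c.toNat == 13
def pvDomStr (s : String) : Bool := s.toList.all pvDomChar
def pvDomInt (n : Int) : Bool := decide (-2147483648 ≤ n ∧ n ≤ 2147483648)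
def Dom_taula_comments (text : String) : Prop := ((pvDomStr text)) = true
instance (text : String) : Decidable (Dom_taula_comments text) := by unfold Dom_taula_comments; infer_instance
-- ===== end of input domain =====

-- B replaces A's character-by-character scan by a find/jump scanner between the markers; same return value.

-- ===== PORT A =====
-- A's while-True loop over an index i, with state (taula, encomentari, inicoment, i).
-- text[i:i+3] / text[i:i+4] are ported as PySem.List.slice on the character list.
-- The loop advances i by at least 1 per iteration and continues only while i < len(text),
-- so `fuel = len(text) + 1` iterations always suffice: the fuel guard is never hit.
-- Python's `inicoment` is unassigned before the first "<!--"; it is only ever read after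
-- being assigned, so the port carries it with dummy initial value 0.
def loopA (cs : List Char) (fuel : Nat) (taula : List (Int × Int)) (enc : Bool) (ini i : Nat) :
    List (Int × Int) :=
  match fuel with
  | 0 => taula
  | fuel + 1 =>
    if enc = true ∧ PySem.List.slice cs (some (i : Int)) (some ((i + 3 : Nat) : Int)) = ['-', '-', '>'] then
      -- taula.append((inicoment, i + 3)), written out in both arms
      if i + 3 < cs.length then
        loopA cs fuel (taula ++ [((ini : Int), ((i + 3 : Nat) : Int))]) false ini (i + 3)
      else taula ++ [((ini : Int), ((i + 3 : Nat) : Int))]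
    else if PySem.List.slice cs (some (i : Int)) (some ((i + 4 : Nat) : Int)) = ['<', '!', '-', '-'] then
      if i + 4 < cs.length then loopA cs fuel taula true i (i + 4) else taula
    else if i + 1 < cs.length then loopA cs fuel taula enc ini (i + 1) else taula

def taula_comments (text : String) : List (Int × Int) :=
  loopA text.toList (text.toList.length + 1) [] false 0 0

-- ===== PORT B =====
-- B's while-True loop jumps between marker occurrences with text.find(sub, i)
-- (ported as PySem.Chars.findFrom).  Every iteration either returns or moves i
-- forward by at least 3, so the same fuel guard `len(text) + 1` is never hit.
def loopB (cs : List Char) (fuel : Nat) (taula : List (Int × Int)) (enc : Bool) (ini i : Nat) :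
    List (Int × Int) :=
  match fuel with
  | 0 => taula
  | fuel + 1 =>
    if enc = true then
      -- close := text.find("-->", i); reopen := text.find("<!--", i)   (inlined)
      if PySem.Chars.findFrom cs ['<', '!', '-', '-'] (i : Int) none ≠ -1 ∧
          (PySem.Chars.findFrom cs ['-', '-', '>'] (i : Int) none = -1 ∨
            PySem.Chars.findFrom cs ['<', '!', '-', '-'] (i : Int) none
              < PySem.Chars.findFrom cs ['-', '-', '>'] (i : Int) none) then
        loopB cs fuel taula true (PySem.Chars.findFrom cs ['<', '!', '-', '-'] (i : Int) none).toNat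
          ((PySem.Chars.findFrom cs ['<', '!', '-', '-'] (i : Int) none).toNat + 4)
      else if PySem.Chars.findFrom cs ['-', '-', '>'] (i : Int) none = -1 then taula
      else
        loopB cs fuel
          (taula ++ [((ini : Int), PySem.Chars.findFrom cs ['-', '-', '>'] (i : Int) none + 3)])
          false ini ((PySem.Chars.findFrom cs ['-', '-', '>'] (i : Int) none).toNat + 3)
    else
      -- j := text.find("<!--", i)   (inlined)
      if PySem.Chars.findFrom cs ['<', '!', '-', '-'] (i : Int) none = -1 then taula
      else loopB cs fuel taula true (PySem.Chars.findFrom cs ['<', '!', '-', '-'] (i : Int) none).toNat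
        ((PySem.Chars.findFrom cs ['<', '!', '-', '-'] (i : Int) none).toNat + 4)

def taula_comments_alt (text : String) : List (Int × Int) :=
  loopB text.toList (text.toList.length + 1) [] false 0 0

-- ===== PRECONDITION & SPEC =====
def Spec_taula_comments (text : String) (out : List (Int × Int)) : Prop := out = taula_comments_alt text
instance (text : String) (out : List (Int × Int)) : Decidable (Spec_taula_comments text out) := by unfold Spec_taula_comments; infer_instance

-- ===== CLAIM (what is proved, stated in full; the proofs are below) =====
def Claim_equal_taula_comments : Prop := ∀ (text : String), Dom_taula_comments text → Spec_taula_comments text (taula_comments text)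

-- ===== LEMMAS AND PROOFS =====

theorem pvFind_gt (s pat : List Char) (i : Nat) (h : s.length < i) :
    PySem.Chars.findFrom s pat (i : Int) none = -1 := by
  simp only [PySem.Chars.findFrom]
  rw [if_neg (by omega : ¬ ((i : Int) < 0)), if_pos (by exact_mod_cast h)]

theorem pvFind_facts (s pat : List Char) (i : Nat) (hp : pat ≠ [])
    (h : PySem.Chars.findFrom s pat (i : Int) none ≠ -1) :
    i ≤ (PySem.Chars.findFrom s pat (i : Int) none).toNat ∧
    (PySem.Chars.findFrom s pat (i : Int) none).toNat + pat.length ≤ s.length ∧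
    PySem.Chars.findFrom s pat (i : Int) none
      = (((PySem.Chars.findFrom s pat (i : Int) none).toNat : Nat) : Int) ∧
    pat <+: s.drop (PySem.Chars.findFrom s pat (i : Int) none).toNat ∧
    ∀ k, i ≤ k → k < (PySem.Chars.findFrom s pat (i : Int) none).toNat →
      ¬ pat <+: s.drop k := by
  have hi : i ≤ s.length := by
    by_contra hlt
    exact h (pvFind_gt s pat i (by omega))
  obtain ⟨h1, h2, h3⟩ := PySem.Chars.findFrom_natCast_spec s pat i hi h
  have hnn : 0 ≤ PySem.Chars.findFrom s pat (i : Int) none := le_trans (by exact_mod_cast Nat.zero_le i) h1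
  have hcast : PySem.Chars.findFrom s pat (i : Int) none
      = (((PySem.Chars.findFrom s pat (i : Int) none).toNat : Nat) : Int) := (Int.toNat_of_nonneg hnn).symm
  have hlen : pat.length ≤ (s.drop (PySem.Chars.findFrom s pat (i : Int) none).toNat).length :=
    h2.length_le
  rw [List.length_drop] at hlen
  have hplen : 0 < pat.length := List.length_pos_of_ne_nil hp
  exact ⟨by omega, by omega, hcast, h2, h3⟩

theorem pvFind_neg_all (s pat : List Char) (i : Nat) (hp : pat ≠ [])
    (h : PySem.Chars.findFrom s pat (i : Int) none = -1) :
    ∀ k, i ≤ k → ¬ pat <+: s.drop k := by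
  intro k hk hpre
  by_cases hi : i ≤ s.length
  · rw [PySem.Chars.findFrom_natCast_eq_neg_one_iff s pat i hi] at h
    apply h
    have hdk : s.drop k = List.drop (k - i) (s.drop i) := by
      rw [List.drop_drop]; congr 1; omega
    rw [hdk] at hpre
    exact hpre.isInfix.trans (List.drop_suffix _ _).isInfix
  · have hdk : s.drop k = [] := List.drop_eq_nil_of_le (by omega)
    rw [hdk, List.prefix_nil] at hpre
    exact hp hpre

theorem pvFind_none_of_no_room (s pat : List Char) (i : Nat) (hp : pat ≠ [])
    (h : s.length < i + pat.length) :
    PySem.Chars.findFrom s pat (i : Int) none = -1 := by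
  by_contra hne
  have hf := pvFind_facts s pat i hp hne
  omega

theorem pvSlice3_iff (cs : List Char) (i : Nat) :
    PySem.List.slice cs (some (i : Int)) (some ((i + 3 : Nat) : Int)) = ['-', '-', '>'] ↔
      ['-', '-', '>'] <+: cs.drop i := by
  rw [PySem.List.slice_natCast]
  have h3 : i + 3 - i = 3 := by omega
  rw [h3]
  constructor
  · intro h; rw [List.prefix_iff_eq_take]; exact h.symm
  · intro h; rw [List.prefix_iff_eq_take] at h; exact h.symm

theorem pvSlice4_iff (cs : List Char) (i : Nat) :
    PySem.List.slice cs (some (i : Int)) (some ((i + 4 : Nat) : Int)) = ['<', '!', '-', '-'] ↔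
      ['<', '!', '-', '-'] <+: cs.drop i := by
  rw [PySem.List.slice_natCast]
  have h4 : i + 4 - i = 4 := by omega
  rw [h4]
  constructor
  · intro h; rw [List.prefix_iff_eq_take]; exact h.symm
  · intro h; rw [List.prefix_iff_eq_take] at h; exact h.symm

-- A does nothing at a position carrying neither marker.
theorem loopA_step (cs : List Char) (fuel : Nat) (ta : List (Int × Int)) (enc : Bool) (ini i : Nat)
    (h1 : enc = true → ¬ ['-', '-', '>'] <+: cs.drop i)
    (h2 : ¬ ['<', '!', '-', '-'] <+: cs.drop i) :
    loopA cs (fuel + 1) ta enc ini i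
      = if i + 1 < cs.length then loopA cs fuel ta enc ini (i + 1) else ta := by
  rw [loopA]
  rw [if_neg (fun hc => h1 hc.1 ((pvSlice3_iff cs i).mp hc.2)),
      if_neg (fun hc => h2 ((pvSlice4_iff cs i).mp hc))]

-- enough fuel is as good as any other enough fuel
theorem loopA_fuel (cs : List Char) :
    ∀ f1 f2 i ta enc ini, cs.length - i < f1 → cs.length - i < f2 →
      loopA cs f1 ta enc ini i = loopA cs f2 ta enc ini i := by
  intro f1
  induction f1 with
  | zero => intro f2 i ta enc ini h1 _; omega
  | succ f1 ih =>
    intro f2 i ta enc ini h1 h2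
    obtain ⟨g2, rfl⟩ : ∃ g2, f2 = g2 + 1 := ⟨f2 - 1, by omega⟩
    rw [loopA, loopA]
    split_ifs with c1 c2 c2' c3 c3'
    · exact ih g2 (i + 3) _ _ _ (by omega) (by omega)
    · rfl
    · exact ih g2 (i + 4) _ _ _ (by omega) (by omega)
    · rfl
    · exact ih g2 (i + 1) _ _ _ (by omega) (by omega)
    · rfl

-- A skips a marker-free stretch.
theorem loopA_advance (cs : List Char) (ta : List (Int × Int)) (enc : Bool) (ini : Nat) :
    ∀ d i j fuel, j - i = d → i ≤ j → j < cs.length →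
      (∀ k, i ≤ k → k < j →
        (enc = true → ¬ ['-', '-', '>'] <+: cs.drop k) ∧ ¬ ['<', '!', '-', '-'] <+: cs.drop k) →
      loopA cs (fuel + (j - i)) ta enc ini i = loopA cs fuel ta enc ini j := by
  intro d
  induction d with
  | zero =>
    intro i j fuel hd hij _ _
    have hij' : i = j := by omega
    rw [hij', Nat.sub_self, Nat.add_zero]
  | succ d ih =>
    intro i j fuel hd hij hjlen hno
    obtain ⟨ha, hb⟩ := hno i (le_refl i) (by omega)
    have hstep : fuel + (j - i) = (fuel + (j - (i + 1))) + 1 := by omega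
    rw [hstep, loopA_step cs _ ta enc ini i ha hb, if_pos (by omega)]
    exact ih (i + 1) j fuel (by omega) (by omega) hjlen (fun k hk1 hk2 => hno k (by omega) hk2)

-- A runs off the end of a marker-free tail.
theorem loopA_end (cs : List Char) (ta : List (Int × Int)) (enc : Bool) (ini : Nat) :
    ∀ fuel i, cs.length - i < fuel →
      (∀ k, i ≤ k →
        (enc = true → ¬ ['-', '-', '>'] <+: cs.drop k) ∧ ¬ ['<', '!', '-', '-'] <+: cs.drop k) →
      loopA cs fuel ta enc ini i = ta := by
  intro fuel
  induction fuel with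
  | zero => intro i hd _; omega
  | succ fuel ih =>
    intro i hd hno
    obtain ⟨ha, hb⟩ := hno i (le_refl i)
    rw [loopA_step cs fuel ta enc ini i ha hb]
    by_cases h : i + 1 < cs.length
    · rw [if_pos h]; exact ih (i + 1) (by omega) (fun k hk => hno k (by omega))
    · rw [if_neg h]

theorem loopAB (cs : List Char) :
    ∀ d i ta enc ini f1 f2, cs.length + 1 - i ≤ d →
      cs.length - i < f1 → cs.length - i < f2 →
      loopA cs f1 ta enc ini i = loopB cs f2 ta enc ini i := by
  intro d
  induction d with
  | zero =>
    intro i ta enc ini f1 f2 hd h1 h2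
    have hgt : cs.length < i := by omega
    have hnil : cs.drop i = [] := List.drop_eq_nil_of_le (by omega)
    obtain ⟨g1, rfl⟩ : ∃ g1, f1 = g1 + 1 := ⟨f1 - 1, by omega⟩
    obtain ⟨g2, rfl⟩ : ∃ g2, f2 = g2 + 1 := ⟨f2 - 1, by omega⟩
    have hA : loopA cs (g1 + 1) ta enc ini i = ta := by
      rw [loopA_step cs g1 ta enc ini i
        (fun _ hp => by rw [hnil, List.prefix_nil] at hp; exact absurd hp (by simp))
        (fun hp => by rw [hnil, List.prefix_nil] at hp; exact absurd hp (by simp)),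
        if_neg (by omega)]
    have ho := pvFind_gt cs ['<', '!', '-', '-'] i hgt
    have hc := pvFind_gt cs ['-', '-', '>'] i hgt
    rw [hA, loopB]
    cases enc with
    | false => rw [if_neg (by simp), if_pos ho]
    | true => rw [if_pos rfl, if_neg (fun hcon => hcon.1 ho), if_pos hc]
  | succ d ih =>
    intro i ta enc ini f1 f2 hd h1 h2
    obtain ⟨g2, rfl⟩ : ∃ g2, f2 = g2 + 1 := ⟨f2 - 1, by omega⟩
    rw [loopB]
    cases enc with
    | false =>
      rw [if_neg (by simp)]
      by_cases hjn : PySem.Chars.findFrom cs ['<', '!', '-', '-'] (i : Int) none = -1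
      · rw [if_pos hjn]
        exact loopA_end cs ta false ini f1 i h1
          (fun k hk => ⟨fun h => absurd h (by simp),
            pvFind_neg_all cs ['<', '!', '-', '-'] i (by simp) hjn k hk⟩)
      · rw [if_neg hjn]
        obtain ⟨hij, hroom, hcast, hpre, hmin⟩ :=
          pvFind_facts cs ['<', '!', '-', '-'] i (by simp) hjn
        have hpat4 : (['<', '!', '-', '-'] : List Char).length = 4 := rfl
        rw [hpat4] at hroom
        set jt := (PySem.Chars.findFrom cs ['<', '!', '-', '-'] (i : Int) none).toNat with hjt
        have hirr := loopA_fuel cs f1 ((cs.length - jt) + (jt - i) + 1) i ta false ini h1 (by omega)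
        have hadv := loopA_advance cs ta false ini (jt - i) i jt ((cs.length - jt) + 1) rfl hij
          (by omega)
          (fun k hk1 hk2 => ⟨fun h => absurd h (by simp), hmin k hk1 hk2⟩)
        have hshape : (cs.length - jt) + (jt - i) + 1 = ((cs.length - jt) + 1) + (jt - i) := by omega
        rw [hirr, hshape, hadv, loopA,
          if_neg (fun hcon => by exact absurd hcon.1 (by simp)),
          if_pos ((pvSlice4_iff cs jt).mpr hpre)]
        by_cases hlt : jt + 4 < cs.length
        · rw [if_pos hlt]; exact ih (jt + 4) ta true jt (cs.length - jt) g2 (by omega) (by omega) (by omega)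
        · rw [if_neg hlt]
          obtain ⟨g3, hg3⟩ : ∃ g3, g2 = g3 + 1 := ⟨g2 - 1, by omega⟩
          have ho := pvFind_none_of_no_room cs ['<', '!', '-', '-'] (jt + 4) (by simp) (by
            rw [hpat4]; omega)
          have hc := pvFind_none_of_no_room cs ['-', '-', '>'] (jt + 4) (by simp) (by
            show cs.length < jt + 4 + 3; omega)
          rw [hg3, loopB, if_pos rfl, if_neg (fun hcon => hcon.1 ho), if_pos hc]
    | true =>
      rw [if_pos rfl]
      by_cases hcase : PySem.Chars.findFrom cs ['<', '!', '-', '-'] (i : Int) none ≠ -1 ∧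
          (PySem.Chars.findFrom cs ['-', '-', '>'] (i : Int) none = -1 ∨
            PySem.Chars.findFrom cs ['<', '!', '-', '-'] (i : Int) none
              < PySem.Chars.findFrom cs ['-', '-', '>'] (i : Int) none)
      · rw [if_pos hcase]
        obtain ⟨hrn, hdisj⟩ := hcase
        obtain ⟨hir, hroomr, hcastr, hprer, hminr⟩ :=
          pvFind_facts cs ['<', '!', '-', '-'] i (by simp) hrn
        have hpat4 : (['<', '!', '-', '-'] : List Char).length = 4 := rfl
        rw [hpat4] at hroomr
        set rt := (PySem.Chars.findFrom cs ['<', '!', '-', '-'] (i : Int) none).toNat with hrt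
        have hnoC : ∀ k, i ≤ k → k ≤ rt → ¬ ['-', '-', '>'] <+: cs.drop k := by
          rcases hdisj with hcn | hlt
          · exact fun k hk _ => pvFind_neg_all cs ['-', '-', '>'] i (by simp) hcn k hk
          · intro k hk1 hk2
            have hcn : PySem.Chars.findFrom cs ['-', '-', '>'] (i : Int) none ≠ -1 := by
              intro h0; rw [h0] at hlt
              have hnn : (0 : Int) ≤ PySem.Chars.findFrom cs ['<', '!', '-', '-'] (i : Int) none := by
                rw [hcastr]; exact Int.natCast_nonneg _
              omega
            obtain ⟨hic, _, hcastc, _, hminc⟩ :=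
              pvFind_facts cs ['-', '-', '>'] i (by simp) hcn
            apply hminc k hk1
            have hltn : rt < (PySem.Chars.findFrom cs ['-', '-', '>'] (i : Int) none).toNat := by
              rw [hcastr, hcastc] at hlt
              exact_mod_cast hlt
            omega
        have hirr := loopA_fuel cs f1 ((cs.length - rt) + (rt - i) + 1) i ta true ini h1 (by omega)
        have hadv := loopA_advance cs ta true ini (rt - i) i rt ((cs.length - rt) + 1) rfl hir
          (by omega)
          (fun k hk1 hk2 => ⟨fun _ => hnoC k hk1 (by omega), hminr k hk1 hk2⟩)
        have hshape : (cs.length - rt) + (rt - i) + 1 = ((cs.length - rt) + 1) + (rt - i) := by omega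
        rw [hirr, hshape, hadv, loopA,
          if_neg (fun hcon => hnoC rt hir (le_refl rt) ((pvSlice3_iff cs rt).mp hcon.2)),
          if_pos ((pvSlice4_iff cs rt).mpr hprer)]
        by_cases hlt4 : rt + 4 < cs.length
        · rw [if_pos hlt4]; exact ih (rt + 4) ta true rt (cs.length - rt) g2 (by omega) (by omega) (by omega)
        · rw [if_neg hlt4]
          obtain ⟨g3, hg3⟩ : ∃ g3, g2 = g3 + 1 := ⟨g2 - 1, by omega⟩
          have ho := pvFind_none_of_no_room cs ['<', '!', '-', '-'] (rt + 4) (by simp) (by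
            rw [hpat4]; omega)
          have hc := pvFind_none_of_no_room cs ['-', '-', '>'] (rt + 4) (by simp) (by
            show cs.length < rt + 4 + 3; omega)
          rw [hg3, loopB, if_pos rfl, if_neg (fun hcon => hcon.1 ho), if_pos hc]
      · rw [if_neg hcase]
        by_cases hcn : PySem.Chars.findFrom cs ['-', '-', '>'] (i : Int) none = -1
        · rw [if_pos hcn]
          have hrn : PySem.Chars.findFrom cs ['<', '!', '-', '-'] (i : Int) none = -1 := by
            by_contra hne; exact hcase ⟨hne, Or.inl hcn⟩
          exact loopA_end cs ta true ini f1 i h1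
            (fun k hk => ⟨fun _ => pvFind_neg_all cs ['-', '-', '>'] i (by simp) hcn k hk,
              pvFind_neg_all cs ['<', '!', '-', '-'] i (by simp) hrn k hk⟩)
        · rw [if_neg hcn]
          obtain ⟨hic, hroomc, hcastc, hprec, hminc⟩ :=
            pvFind_facts cs ['-', '-', '>'] i (by simp) hcn
          have hpat3 : (['-', '-', '>'] : List Char).length = 3 := rfl
          rw [hpat3] at hroomc
          set ct := (PySem.Chars.findFrom cs ['-', '-', '>'] (i : Int) none).toNat with hct
          have hnoO : ∀ k, i ≤ k → k < ct → ¬ ['<', '!', '-', '-'] <+: cs.drop k := by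
            by_cases hrn : PySem.Chars.findFrom cs ['<', '!', '-', '-'] (i : Int) none = -1
            · exact fun k hk _ => pvFind_neg_all cs ['<', '!', '-', '-'] i (by simp) hrn k hk
            · have hcr : ¬ (PySem.Chars.findFrom cs ['<', '!', '-', '-'] (i : Int) none
                  < PySem.Chars.findFrom cs ['-', '-', '>'] (i : Int) none) :=
                fun hlt => hcase ⟨hrn, Or.inr hlt⟩
              obtain ⟨hir, _, hcastr, _, hminr⟩ :=
                pvFind_facts cs ['<', '!', '-', '-'] i (by simp) hrn
              intro k hk1 hk2
              apply hminr k hk1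
              have hle : ct ≤ (PySem.Chars.findFrom cs ['<', '!', '-', '-'] (i : Int) none).toNat := by
                rw [hcastr, hcastc] at hcr
                push Not at hcr
                exact_mod_cast hcr
              omega
          have hirr := loopA_fuel cs f1 ((cs.length - ct) + (ct - i) + 1) i ta true ini h1 (by omega)
          have hadv := loopA_advance cs ta true ini (ct - i) i ct ((cs.length - ct) + 1) rfl hic
            (by omega)
            (fun k hk1 hk2 => ⟨fun _ => hminc k hk1 hk2, hnoO k hk1 hk2⟩)
          have hshape : (cs.length - ct) + (ct - i) + 1 = ((cs.length - ct) + 1) + (ct - i) := by omega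
          rw [hirr, hshape, hadv, loopA, if_pos ⟨rfl, (pvSlice3_iff cs ct).mpr hprec⟩]
          have hv : (PySem.Chars.findFrom cs ['-', '-', '>'] (i : Int) none + 3 : Int)
              = ((ct + 3 : Nat) : Int) := by
            rw [hcastc]; push_cast; ring
          rw [hv]
          by_cases hlt3 : ct + 3 < cs.length
          · rw [if_pos hlt3]
            exact ih (ct + 3) (ta ++ [((ini : Int), ((ct + 3 : Nat) : Int))]) false ini
              (cs.length - ct) g2 (by omega) (by omega) (by omega)
          · rw [if_neg hlt3]
            obtain ⟨g3, hg3⟩ : ∃ g3, g2 = g3 + 1 := ⟨g2 - 1, by omega⟩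
            have ho := pvFind_none_of_no_room cs ['<', '!', '-', '-'] (ct + 3) (by simp) (by
              show cs.length < ct + 3 + 4; omega)
            rw [hg3, loopB, if_neg (by simp), if_pos ho]

-- ===== VERDICT (by name: the statement is the Claim_ definition above) =====
theorem taula_comments_spec : Claim_equal_taula_comments := by
  intro text _
  show taula_comments text = taula_comments_alt text
  exact loopAB text.toList (text.toList.length + 1) 0 [] false 0
    (text.toList.length + 1) (text.toList.length + 1) (by omega) (by omega) (by omega)
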